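-- pv_equiv track=rewrite | github.com/TallonKH/HalperBot | coup.py | cardFormatter
-- ===== SOURCE A (Python) =====
-- def cardFormatter(cds):
--         if(len(cds) == 1):
--             cd = cds[0]
--             return f"a{'n' if cd[0] == 'A' else ''} **{cd}**"
--
--         if(len(cds) == 2):
--             [c1,c2] = cds
--             if(c1 == c2):
--                 return f"***Double {c1}s***"
--             else:
--                 return f"{cardFormatter([c1])} and {cardFormatter([c2])}"
--         elif(len(cds) == 3):
--             [c1,c2, c3] = cds
--             return f"{cardFormatter([c1])}, {cardFormatter([c2])}, and {cardFormatter([c3])}"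
--         elif(len(cds) == 4):
--             [c1,c2,c3,c4] = cds
--             return f"{cardFormatter([c1])}, {cardFormatter([c2])}, {cardFormatter([c3])}, and {cardFormatter([c4])}"
-- ===== SOURCE B (Python) =====
-- def cardFormatter(cds):
--     n = len(cds)
--     if n == 2 and cds[0] == cds[1]:
--         return f"***Double {cds[0]}s***"
--     if not (1 <= n <= 4):
--         return None
--     out = ""
--     for i, cd in enumerate(cds):
--         if i > 0:
--             out += " and " if n == 2 else (", and " if i == n - 1 else ", ")
--         out += "an " if cd.startswith("A") else "a "
--         out += f"**{cd}**"
--     return out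
-- ===== Notes on version B (the rewrite author's own statement) =====
-- stated objective: alternative
-- what changed: Replaces A's self-recursion on one-element sublists and per-length joining branches by a single forward loop over enumerate(cds) with a string accumulator, choosing each separator (' and ' / ', ' / ', and ') from the index, after one up-front Double check.
-- outside the precondition, e.g. on cardFormatter([]): A returns None, B returns None; on cardFormatter(['Duke', '']): A raises IndexError, B returns 'a **Duke** and a ****'
import Mathlib
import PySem

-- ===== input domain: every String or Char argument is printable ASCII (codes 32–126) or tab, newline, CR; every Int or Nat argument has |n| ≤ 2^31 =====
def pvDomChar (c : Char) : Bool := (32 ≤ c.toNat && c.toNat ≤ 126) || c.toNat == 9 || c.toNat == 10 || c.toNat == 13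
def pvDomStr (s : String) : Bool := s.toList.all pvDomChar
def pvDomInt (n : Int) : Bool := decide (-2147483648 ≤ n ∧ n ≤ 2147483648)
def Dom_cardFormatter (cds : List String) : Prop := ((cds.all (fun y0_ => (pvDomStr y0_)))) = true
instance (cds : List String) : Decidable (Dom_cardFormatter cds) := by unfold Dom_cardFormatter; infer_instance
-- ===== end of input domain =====

-- B replaces A's self-recursion on singleton sublists by one forward loop with a string accumulator that picks each separator from the position (different decomposition, same cost). Outside Pre_ (len 0 / >= 5: A returns None; an empty card string outside the Double case: A raises) nothing is claimed.


-- ===== PORT A =====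
-- literal port of A: length dispatch, singleton case computes cd[0] (raises on "": excluded by Pre_),
-- longer cases recurse on the one-element sublists; len 0 / ≥ 5 fall through (Python returns None: outside Pre_)
def cardFormatter (cds : List String) : String :=
  match cds with
  | [cd] => "a" ++ (if PySem.Str.pyGet? cd 0 = some 'A' then "n" else "") ++ " **" ++ cd ++ "**"
  | [c1, c2] =>
      if c1 = c2 then "***Double " ++ c1 ++ "s***"
      else cardFormatter [c1] ++ " and " ++ cardFormatter [c2]
  | [c1, c2, c3] =>
      cardFormatter [c1] ++ ", " ++ cardFormatter [c2] ++ ", and " ++ cardFormatter [c3]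
  | [c1, c2, c3, c4] =>
      cardFormatter [c1] ++ ", " ++ cardFormatter [c2] ++ ", " ++ cardFormatter [c3] ++ ", and " ++ cardFormatter [c4]
  | _ => ""        -- Python returns None here; outside Pre_

-- ===== PORT B =====
-- literal port of Source B: Double check first, then ONE pass over enumerate(cds) with a string
-- accumulator, the separator chosen from the index before each card is appended
def cardFormatter_alt (cds : List String) : String :=
  let n := cds.length
  if n = 2 ∧ PySem.List.pyGetD cds 0 "" = PySem.List.pyGetD cds 1 "" then
    "***Double " ++ PySem.List.pyGetD cds 0 "" ++ "s***"
  else if 1 ≤ n ∧ n ≤ 4 then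
    (PySem.List.enumerate cds).foldl (fun out p =>
      (if p.1 > 0 then
        out ++ (if n = 2 then " and " else if p.1 = (n : Int) - 1 then ", and " else ", ")
       else out)
      ++ (if PySem.Str.startswith p.2 "A" then "an " else "a ")
      ++ "**" ++ p.2 ++ "**") ""
  else ""          -- Python returns None here; outside Pre_

-- ===== PRECONDITION & SPEC =====
-- Pre_ excludes lists of length 0 or ≥ 5 (A returns None, not a string) and lists of length 1..4
-- containing an empty string outside the equal-pair Double case (A raises IndexError on cd[0]).
def Pre_cardFormatter (cds : List String) : Prop :=
  (1 ≤ cds.length ∧ cds.length ≤ 4) ∧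
  ((cds.length = 2 ∧ cds[0]? = cds[1]?) ∨ ∀ c ∈ cds, c ≠ "")
instance (cds : List String) : Decidable (Pre_cardFormatter cds) := by unfold Pre_cardFormatter; infer_instance
def pvWitness_cardFormatter : List String := ["Duke", "Assassin", "Captain"]

def Spec_cardFormatter (cds : List String) (out : String) : Prop := out = cardFormatter_alt cds
instance (cds : List String) (out : String) : Decidable (Spec_cardFormatter cds out) := by unfold Spec_cardFormatter; infer_instance

-- ===== CLAIM =====
def Claim_equal_cardFormatter : Prop := ∀ (cds : List String), Dom_cardFormatter cds → Pre_cardFormatter cds → Spec_cardFormatter cds (cardFormatter cds)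

-- ===== LEMMAS AND PROOFS =====
-- B's article test startswith(cd, "A") agrees with A's cd[0] == 'A' on nonempty cd
lemma pv_cond (l : List Char) (h : l ≠ []) :
    PySem.Chars.startswith l ['A'] = decide (PySem.List.pyGet? l 0 = some 'A') := by
  cases l with
  | nil => exact absurd rfl h
  | cons c rest =>
    by_cases hA : c = 'A'
    · simp [PySem.Chars.startswith, PySem.List.pyGet?, PySem.List.pyIdx?, hA, List.isPrefixOf]
    · simp only [PySem.Chars.startswith, PySem.List.pyGet?, PySem.List.pyIdx?, List.isPrefixOf, Bool.and_true]
      simp [hA]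
      exact fun h => hA h.symm

lemma pv_ne_nil (s : String) (h : s ≠ "") : s.toList ≠ [] := by
  intro hx
  exact h (String.toList_injective (by simp [hx]))

-- ===== VERDICT =====
theorem cardFormatter_spec : Claim_equal_cardFormatter := by
  intro cds _ pre
  unfold Spec_cardFormatter
  rcases cds with _ | ⟨a, _ | ⟨b, _ | ⟨c, _ | ⟨d, _ | ⟨e, rest⟩⟩⟩⟩⟩
  · exact absurd pre (by simp [Pre_cardFormatter])
  · have ha : a.toList ≠ [] := pv_ne_nil a (by
      rcases pre.2 with h | h
      · simp at h
      · exact h a (by simp))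
    refine String.toList_injective ?_
    simp [cardFormatter, cardFormatter_alt, PySem.List.pyGetD, PySem.List.enumerate,
      pv_cond a.toList ha]
    by_cases hA : PySem.List.pyGet? a.toList 0 = some 'A' <;> simp [hA]
  · by_cases hab : a = b
    · simp [cardFormatter, cardFormatter_alt, PySem.List.pyGetD, hab]
    · have hne : ∀ x ∈ [a, b], x ≠ "" := by
        rcases pre.2 with h | h
        · exact absurd (by simpa using h.2) hab
        · exact h
      refine String.toList_injective ?_
      simp [cardFormatter, cardFormatter_alt, PySem.List.pyGetD, PySem.List.enumerate, hab,
        pv_cond a.toList (pv_ne_nil a (hne a (by simp))),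
        pv_cond b.toList (pv_ne_nil b (hne b (by simp)))]
      by_cases hA : PySem.List.pyGet? a.toList 0 = some 'A' <;>
        by_cases hB : PySem.List.pyGet? b.toList 0 = some 'A' <;>
          simp [hA, hB]
  · have hne : ∀ x ∈ [a, b, c], x ≠ "" := by
      rcases pre.2 with h | h
      · simp at h
      · exact h
    refine String.toList_injective ?_
    simp [cardFormatter, cardFormatter_alt, PySem.List.pyGetD, PySem.List.enumerate,
      pv_cond a.toList (pv_ne_nil a (hne a (by simp))),
      pv_cond b.toList (pv_ne_nil b (hne b (by simp))),
      pv_cond c.toList (pv_ne_nil c (hne c (by simp)))]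
    by_cases hA : PySem.List.pyGet? a.toList 0 = some 'A' <;>
      by_cases hB : PySem.List.pyGet? b.toList 0 = some 'A' <;>
        by_cases hC : PySem.List.pyGet? c.toList 0 = some 'A' <;>
          simp [hA, hB, hC]
  · have hne : ∀ x ∈ [a, b, c, d], x ≠ "" := by
      rcases pre.2 with h | h
      · simp at h
      · exact h
    refine String.toList_injective ?_
    simp [cardFormatter, cardFormatter_alt, PySem.List.pyGetD, PySem.List.enumerate,
      pv_cond a.toList (pv_ne_nil a (hne a (by simp))),
      pv_cond b.toList (pv_ne_nil b (hne b (by simp))),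
      pv_cond c.toList (pv_ne_nil c (hne c (by simp))),
      pv_cond d.toList (pv_ne_nil d (hne d (by simp)))]
    by_cases hA : PySem.List.pyGet? a.toList 0 = some 'A' <;>
      by_cases hB : PySem.List.pyGet? b.toList 0 = some 'A' <;>
        by_cases hC : PySem.List.pyGet? c.toList 0 = some 'A' <;>
          by_cases hD : PySem.List.pyGet? d.toList 0 = some 'A' <;>
            simp [hA, hB, hC, hD]
  · exact absurd pre (by simp [Pre_cardFormatter])
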